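-- pv_equiv track=rewrite | github.com/farabi1038/algo_problem_solve | Medium/best_seat finding_cinema.py | bestSeat
-- ===== SOURCE A (Python) =====
-- def bestSeat(seats):
--     leftIdx=0
--     max_space=0
--     best_seat=-1
--
--     while leftIdx< (len(seats)):
--             rightIdx= leftIdx+1
--             while rightIdx<len(seats) and seats[rightIdx]==0:
--                 rightIdx+=1
--
--             available=rightIdx-leftIdx-1
--             if available>max_space:
--                     best_seat= (leftIdx+rightIdx)//2
--                     max_space=available
--
--             leftIdx=rightIdx
--
--
--
--
--
--
--
--     return best_seat
-- ===== SOURCE B (Python) =====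
-- def bestSeat(seats):
--     n = len(seats)
--     # boundary indices: a virtual occupant at 0, every occupied seat after it, and a virtual occupant at n
--     bounds = [0]
--     for i in range(1, n):
--         if seats[i] != 0:
--             bounds.append(i)
--     bounds.append(n)
--     max_space = 0
--     best_seat = -1
--     for l, r in zip(bounds, bounds[1:]):
--         available = r - l - 1
--         if available > max_space:
--             best_seat = (l + r) // 2
--             max_space = available
--     return best_seat
-- ===== Notes on version B (the rewrite author's own statement) =====
-- stated objective: alternative
-- what changed: Replaces the interleaved two-pointer sweep (an inner while-scan nested in the outer while) with two flat passes: first build the list of boundary indices (virtual occupant at 0, occupied seats, virtual occupant at n), then scan consecutive boundary pairs for the widest gap.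
import Mathlib
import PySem

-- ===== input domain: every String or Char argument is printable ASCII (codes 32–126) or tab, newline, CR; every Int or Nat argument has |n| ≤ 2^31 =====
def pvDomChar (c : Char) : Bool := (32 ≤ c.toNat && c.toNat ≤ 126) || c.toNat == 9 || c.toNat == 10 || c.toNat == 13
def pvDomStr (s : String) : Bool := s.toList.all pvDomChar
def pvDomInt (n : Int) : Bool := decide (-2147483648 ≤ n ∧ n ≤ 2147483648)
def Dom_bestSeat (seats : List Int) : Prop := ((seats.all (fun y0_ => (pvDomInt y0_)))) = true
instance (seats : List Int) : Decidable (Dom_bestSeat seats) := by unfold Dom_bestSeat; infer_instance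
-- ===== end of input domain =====

-- B replaces A's interleaved two-pointer sweep by two flat passes (a boundary-index list, then a pair scan); same cost, different decomposition.

-- ===== PORT A =====
-- inner while: advance rightIdx over empty seats (index checked in range before access, so getD is exact)
def scanA (seats : List Int) (r : Nat) : Nat :=
  if r < seats.length ∧ seats.getD r 0 = 0 then scanA seats (r + 1) else r
termination_by seats.length - r
decreasing_by omega

-- needed by loopA's termination proof
theorem scanA_ge (seats : List Int) (r : Nat) : r ≤ scanA seats r := by
  fun_induction scanA seats r with
  | case1 _ _ ih => omega
  | case2 => omega

-- outer while loop of A, state (leftIdx, max_space, best_seat)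
def loopA (seats : List Int) (l : Nat) (ms bs : Int) : Int :=
  if h : l < seats.length then
    let r := scanA seats (l + 1)
    let available : Int := (r : Int) - (l : Int) - 1
    if available > ms then loopA seats r available (PySem.Int.floordiv ((l : Int) + (r : Int)) 2)
    else loopA seats r ms bs
  else bs
termination_by seats.length - l
decreasing_by
  · have := scanA_ge seats (l + 1); omega
  · have := scanA_ge seats (l + 1); omega

def bestSeat (seats : List Int) : Int := loopA seats 0 0 (-1)

-- ===== PORT B =====
-- for l, r in zip(bounds, bounds[1:]): the pair scan ((l+r)//2 on nonneg ints is Nat division)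
def foldPairs : List Nat → Int → Int → Int
  | l :: r :: rest, ms, bs =>
    let available : Int := (r : Int) - (l : Int) - 1
    if available > ms then foldPairs (r :: rest) available (((l + r) / 2 : Nat) : Int)
    else foldPairs (r :: rest) ms bs
  | _, _, bs => bs

def bestSeat_alt (seats : List Int) : Int :=
  let n := seats.length
  -- bounds = [0] + [i for i in range(1, n) if seats[i] != 0] + [n]
  let bounds : List Nat :=
    0 :: ((List.range' 1 (n - 1)).filter (fun i => seats.getD i 0 != 0) ++ [n])
  foldPairs bounds 0 (-1)

-- ===== PRECONDITION & SPEC =====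
def Spec_bestSeat (seats : List Int) (out : Int) : Prop := out = bestSeat_alt seats
instance (seats : List Int) (out : Int) : Decidable (Spec_bestSeat seats out) := by unfold Spec_bestSeat; infer_instance

-- ===== CLAIM (what is proved, stated in full; the proofs are below) =====
def Claim_equal_bestSeat : Prop := ∀ (seats : List Int), Dom_bestSeat seats → Spec_bestSeat seats (bestSeat seats)

-- ===== LEMMAS AND PROOFS =====

theorem scanA_le (seats : List Int) (r : Nat) (h : r ≤ seats.length) :
    scanA seats r ≤ seats.length := by
  fun_induction scanA seats r with
  | case1 _ hc ih => exact ih (by omega)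
  | case2 => omega

-- the occupied indices from j onward start exactly at scanA seats j (or there are none before n)
theorem scanA_filter (seats : List Int) (j : Nat) :
    (List.range' j (seats.length - j)).filter (fun i => seats.getD i 0 != 0) =
      if scanA seats j < seats.length then
        scanA seats j ::
          (List.range' (scanA seats j + 1) (seats.length - (scanA seats j + 1))).filter
            (fun i => seats.getD i 0 != 0)
      else [] := by
  fun_induction scanA seats j with
  | case1 r hc ih =>
    obtain ⟨hlt, hzero⟩ := hc
    have hrange : seats.length - r = (seats.length - (r + 1)) + 1 := by omega
    rw [hrange, List.range'_succ, List.filter_cons, hzero]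
    simpa using ih
  | case2 r hc =>
    by_cases hlt : r < seats.length
    · have hzero : ¬ seats.getD r 0 = 0 := fun h => hc ⟨hlt, h⟩
      have hp : (seats.getD r 0 != 0) = true := by simp only [bne_iff_ne, ne_eq]; exact hzero
      have hrange : seats.length - r = (seats.length - (r + 1)) + 1 := by omega
      rw [hrange, List.range'_succ, List.filter_cons, hp]
      simp [hlt]
    · have h0 : seats.length - r = 0 := by omega
      simp [h0, hlt]

theorem mid_cast (l r : Nat) :
    PySem.Int.floordiv ((l : Int) + (r : Int)) 2 = (((l + r) / 2 : Nat) : Int) := by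
  rw [show ((l : Int) + (r : Int)) = ((l + r : Nat) : Int) by push_cast; ring]
  exact_mod_cast PySem.Int.floordiv_natCast (l + r) 2

-- loop invariant: A's sweep from l equals B's pair scan over l followed by the remaining boundaries
theorem loopA_eq_foldPairs (seats : List Int) (l : Nat) (ms bs : Int) (hms : 0 ≤ ms) :
    loopA seats l ms bs =
      foldPairs
        (l :: ((List.range' (l + 1) (seats.length - (l + 1))).filter
                (fun i => seats.getD i 0 != 0) ++ [seats.length])) ms bs := by
  fun_induction loopA seats l ms bs with
  | case1 l ms bs hlt r available hgt ih =>
    have hge : l + 1 ≤ r := scanA_ge seats (l + 1)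
    have hle : r ≤ seats.length := scanA_le seats (l + 1) (by omega)
    have hav : (0 : Int) ≤ available := le_of_lt (lt_of_le_of_lt hms hgt)
    rw [scanA_filter seats (l + 1)]
    simp only [show scanA seats (l + 1) = r from rfl]
    by_cases hr : r < seats.length
    · rw [if_pos hr, List.cons_append, foldPairs, if_pos hgt, ← mid_cast]
      exact ih hav
    · have hrn : seats.length = r := by omega
      rw [if_neg hr, List.nil_append, hrn, foldPairs, if_pos hgt, ← mid_cast]
      rw [loopA, dif_neg (show ¬ r < seats.length by omega)]
      simp [foldPairs]
  | case2 l ms bs hlt r available hgt ih =>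
    have hge : l + 1 ≤ r := scanA_ge seats (l + 1)
    have hle : r ≤ seats.length := scanA_le seats (l + 1) (by omega)
    rw [scanA_filter seats (l + 1)]
    simp only [show scanA seats (l + 1) = r from rfl]
    by_cases hr : r < seats.length
    · rw [if_pos hr, List.cons_append, foldPairs, if_neg hgt]
      exact ih hms
    · have hrn : seats.length = r := by omega
      rw [if_neg hr, List.nil_append, hrn, foldPairs, if_neg hgt]
      rw [loopA, dif_neg (show ¬ r < seats.length by omega)]
      simp [foldPairs]
  | case3 l ms bs hlt =>
    have h0 : seats.length - (l + 1) = 0 := by omega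
    rw [h0]
    simp only [List.range'_zero, List.filter_nil, List.nil_append]
    rw [foldPairs, if_neg (by omega)]
    simp [foldPairs]

-- ===== VERDICT (by name: the statement is the Claim_ definition above) =====
theorem bestSeat_spec : Claim_equal_bestSeat := by
  intro seats _
  unfold Spec_bestSeat bestSeat bestSeat_alt
  simpa using loopA_eq_foldPairs seats 0 0 (-1) le_rfl
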